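-- pv_equiv track=rewrite | github.com/pietrodll/coding-challenges | project-euler/problems/problem40.py | digit_sequence
-- ===== SOURCE A (Python) =====
-- def iter_digits(n):
--     """Gives the digits of n as an iterator"""
--
--     digits = []
--
--     while n != 0:
--         digits.append(n % 10)
--         n //= 10
--
--     return reversed(digits)
--
-- def digit_sequence(limit):
--     """Iterator for the sequence of the concatenated digits of the natural numbers"""
--
--     i = 0
--     n = 1
--     while i < limit:
--         for digit in iter_digits(n):
--             yield digit
--             i += 1
--
--             if i >= limit:
--                 break
--
--         n += 1
-- ===== SOURCE B (Python) =====
-- def digit_sequence(limit):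
--     """Iterator for the sequence of the concatenated digits of the natural numbers"""
--
--     for k in range(limit):
--         # locate the block of d-digit numbers that position k falls in
--         i, d, first, count = k, 1, 1, 9
--         while i >= count * d:
--             i -= count * d
--             d += 1
--             first *= 10
--             count *= 10
--         n, j = divmod(i, d)
--         yield (first + n) // 10 ** (d - 1 - j) % 10
-- ===== Notes on version B (the rewrite author's own statement) =====
-- stated objective: alternative
-- what changed: B computes each output position k independently by closed-form block arithmetic (subtract whole blocks of d-digit numbers to find k's block, then divmod picks the number and the digit via a power of 10) instead of streaming the digits of successive integers with a counter and mid-loop break.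
import Mathlib
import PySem

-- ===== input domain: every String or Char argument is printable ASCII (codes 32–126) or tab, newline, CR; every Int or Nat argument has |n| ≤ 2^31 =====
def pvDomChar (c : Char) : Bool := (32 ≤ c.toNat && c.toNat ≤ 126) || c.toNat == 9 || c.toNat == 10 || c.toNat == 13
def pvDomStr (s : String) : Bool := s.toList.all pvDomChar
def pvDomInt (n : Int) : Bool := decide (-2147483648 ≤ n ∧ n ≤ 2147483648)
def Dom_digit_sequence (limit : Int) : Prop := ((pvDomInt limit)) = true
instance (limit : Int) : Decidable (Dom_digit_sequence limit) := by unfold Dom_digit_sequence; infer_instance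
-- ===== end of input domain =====

-- B computes each output position k independently by closed-form block arithmetic instead of
-- streaming the digits of successive integers; objective: alternative. Both generators are
-- materialised as lists.

-- ===== PORT A =====
-- iter_digits' while-loop: append n % 10, n //= 10, until n == 0.  Ported on n.toNat, exact for
-- n ≥ 0 (digit_sequence only calls it with n ≥ 1; Python's loop would not terminate for n < 0).
def pvDigitsLoop : Nat → List Int → List Int
  | 0, digits => digits
  | m + 1, digits => pvDigitsLoop ((m + 1) / 10) (digits ++ [(((m + 1) % 10 : Nat) : Int)])
  decreasing_by exact Nat.div_lt_self (Nat.succ_pos m) (by omega)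

def iter_digits (n : Int) : List Int := (pvDigitsLoop n.toNat []).reverse

-- the inner 'for digit in iter_digits(n): yield; i += 1; if i >= limit: break' — returns (yielded, new i)
def pvInner : List Int → Int → Int → List Int × Int
  | [], i, _ => ([], i)
  | d :: rest, i, limit =>
      if i + 1 ≥ limit then ([d], i + 1)
      else
        let p := pvInner rest (i + 1) limit
        (d :: p.1, p.2)

-- the outer 'while i < limit' loop; fuel = limit.toNat suffices since i grows by ≥ 1 per iteration
def pvOuter : Nat → Int → Int → Int → List Int
  | 0, _, _, _ => []
  | fuel + 1, limit, i, n =>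
      if i < limit then
        let p := pvInner (iter_digits n) i limit
        p.1 ++ pvOuter fuel limit p.2 (n + 1)
      else []

def digit_sequence (limit : Int) : List Int := pvOuter limit.toNat limit 0 1

-- ===== PORT B =====
-- B's inner 'while i >= count * d: …' loop; all values stay nonnegative, so Nat arithmetic is
-- exact.  fuel = k + 1 suffices: each iteration subtracts count*d ≥ 9 from i.  Returns (i, d, first).
def pvFind : Nat → Nat → Nat → Nat → Nat → Nat × Nat × Nat
  | 0, i, d, first, _ => (i, d, first)
  | fuel + 1, i, d, first, count =>
      if count * d ≤ i then pvFind fuel (i - count * d) (d + 1) (first * 10) (count * 10)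
      else (i, d, first)

-- one loop body of B: 'n, j = divmod(i, d); yield (first + n) // 10 ** (d - 1 - j) % 10'
def pvDigitAt (k : Nat) : Int :=
  let r := pvFind (k + 1) k 1 1 9
  ((((r.2.2 + r.1 / r.2.1) / 10 ^ (r.2.1 - 1 - r.1 % r.2.1)) % 10 : Nat) : Int)

-- 'for k in range(limit)': empty for limit ≤ 0
def digit_sequence_alt (limit : Int) : List Int := (List.range limit.toNat).map pvDigitAt

-- ===== PRECONDITION & SPEC =====
def Spec_digit_sequence (limit : Int) (out : List Int) : Prop := out = digit_sequence_alt limit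
instance (limit : Int) (out : List Int) : Decidable (Spec_digit_sequence limit out) := by unfold Spec_digit_sequence; infer_instance

-- ===== CLAIM (what is proved, stated in full; the proofs are below) =====
def Claim_equal_digit_sequence : Prop := ∀ (limit : Int), Dom_digit_sequence limit → Spec_digit_sequence limit (digit_sequence limit)

-- ===== LEMMAS AND PROOFS =====

-- canonical most-significant-first decimal digit list of a natural number
def pvD : Nat → List Int
  | 0 => []
  | m + 1 => pvD ((m + 1) / 10) ++ [(((m + 1) % 10 : Nat) : Int)]
  decreasing_by exact Nat.div_lt_self (Nat.succ_pos m) (by omega)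

lemma pvDigitsLoop_eq (m : Nat) : ∀ acc, pvDigitsLoop m acc = acc ++ (pvD m).reverse := by
  induction m using Nat.strong_induction_on with
  | _ m ih =>
    intro acc
    match m with
    | 0 => simp [pvDigitsLoop, pvD]
    | m + 1 =>
      rw [pvDigitsLoop, pvD, ih ((m + 1) / 10) (Nat.div_lt_self (Nat.succ_pos m) (by omega))]
      simp

lemma iter_digits_eq (n : Int) : iter_digits n = pvD n.toNat := by
  simp [iter_digits, pvDigitsLoop_eq]

lemma pvD_ne_nil (m : Nat) (h : 0 < m) : pvD m ≠ [] := by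
  match m, h with
  | m + 1, _ => rw [pvD]; simp

lemma pvD_len_pos (m : Nat) (h : 0 < m) : 0 < (pvD m).length :=
  List.length_pos_of_ne_nil (pvD_ne_nil m h)

-- k-th digit of the concatenation pvD (n+1) ++ pvD (n+2) ++ …
def pvAt : Nat → Nat → Int
  | k, n =>
    if k < (pvD (n + 1)).length then (pvD (n + 1)).getD k 0
    else pvAt (k - (pvD (n + 1)).length) (n + 1)
  termination_by k n => k
  decreasing_by
    have := pvD_len_pos (n + 1) (Nat.succ_pos n)
    omega

lemma pvAt_lt (k n : Nat) (h : k < (pvD (n + 1)).length) :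
    pvAt k n = (pvD (n + 1)).getD k 0 := by rw [pvAt]; simp [h]

lemma pvAt_ge (k n : Nat) (h : (pvD (n + 1)).length ≤ k) :
    pvAt k n = pvAt (k - (pvD (n + 1)).length) (n + 1) := by
  rw [pvAt]; simp [Nat.not_lt.mpr h]

-- B-side proof-only recursion: concat of pvD from n, truncated to 'need'
def pvCat : Nat → Nat → Int → List Int
  | 0, _, _ => []
  | fuel + 1, need, n =>
      if need = 0 then []
      else
        let ds := pvD n.toNat
        ds.take need ++ pvCat fuel (need - ds.length) (n + 1)

lemma pvInner_eq : ∀ (ds : List Int) (i limit : Int), i < limit →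
    pvInner ds i limit =
      (ds.take (limit - i).toNat, i + ((min ds.length (limit - i).toNat : Nat) : Int)) := by
  intro ds
  induction ds with
  | nil => intro i limit h; simp [pvInner]
  | cons d rest ih =>
    intro i limit h
    rw [pvInner]
    by_cases hb : i + 1 ≥ limit
    · have hk : (limit - i).toNat = 1 := by omega
      simp [hb, hk]
    · have h1 : i + 1 < limit := by omega
      rw [ih (i + 1) limit h1]
      have hk : (limit - i).toNat = (limit - (i + 1)).toNat + 1 := by omega
      simp only [hb, if_false, hk, Prod.mk.injEq]
      refine ⟨by simp, ?_⟩
      simp only [List.length_cons, Nat.succ_min_succ]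
      push_cast
      ring

lemma pvMain : ∀ (k fa fb : Nat) (limit i n : Int), 1 ≤ n → (limit - i).toNat = k →
    k ≤ fa → k ≤ fb → pvOuter fa limit i n = pvCat fb k n := by
  intro k
  induction k using Nat.strong_induction_on with
  | _ k ih =>
    intro fa fb limit i n hn hk hfa hfb
    by_cases hk0 : k = 0
    · subst hk0
      have hnl : ¬ i < limit := by omega
      cases fa with
      | zero => cases fb with
        | zero => rfl
        | succ fb => simp [pvOuter, pvCat]
      | succ fa => cases fb with
        | zero => simp [pvOuter, pvCat, hnl]
        | succ fb => simp [pvOuter, pvCat, hnl]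
    · have hkpos : 0 < k := Nat.pos_of_ne_zero hk0
      have hil : i < limit := by omega
      cases fa with
      | zero => omega
      | succ fa =>
        cases fb with
        | zero => omega
        | succ fb =>
          rw [pvOuter, if_pos hil, pvCat, if_neg hk0]
          rw [pvInner_eq (iter_digits n) i limit hil, iter_digits_eq]
          have hlen : 0 < (pvD n.toNat).length := pvD_len_pos n.toNat (by omega)
          set L := (pvD n.toNat).length with hL
          have hmin : min L (limit - i).toNat = if L ≤ (limit - i).toNat then L else (limit - i).toNat :=
            Nat.min_def
          dsimp only
          rw [hk]
          congr 1
          have hk'' : (limit - (i + ((min L k : Nat) : Int))).toNat = k - L := by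
            have hmin2 : min L k = if L ≤ k then L else k := Nat.min_def
            omega
          exact ih (k - L) (by omega) fa fb limit _ (n + 1) (by omega) hk'' (by omega) (by omega)

-- length of pvD: m with e+1 digits has a digit list of length e+1
lemma pvD_len : ∀ (e m : Nat), 10 ^ e ≤ m → m < 10 ^ (e + 1) → (pvD m).length = e + 1 := by
  intro e
  induction e with
  | zero =>
    intro m h1 h2
    match m, h1 with
    | m + 1, _ =>
      rw [pvD]
      have : (m + 1) / 10 = 0 := Nat.div_eq_of_lt (by simpa using h2)
      simp [this, pvD]
  | succ e ih =>
    intro m h1 h2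
    have hm : 0 < m := lt_of_lt_of_le (Nat.pow_pos (by omega)) h1
    match m, hm with
    | m + 1, _ =>
      rw [pvD]
      have hq1 : 10 ^ e ≤ (m + 1) / 10 := by
        rw [Nat.le_div_iff_mul_le (by omega)]
        calc 10 ^ e * 10 = 10 ^ (e + 1) := by ring
          _ ≤ m + 1 := h1
      have hq2 : (m + 1) / 10 < 10 ^ (e + 1) := by
        rw [Nat.div_lt_iff_lt_mul (by omega)]
        calc m + 1 < 10 ^ (e + 1 + 1) := h2
          _ = 10 ^ (e + 1) * 10 := by ring
      simp [ih _ hq1 hq2]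

-- dividing by 10 then by 10^e is dividing by 10^(e+1)
lemma div10_pow (m e : Nat) : m / 10 / 10 ^ e = m / 10 ^ (e + 1) := by
  rw [Nat.div_div_eq_div_mul, ← pow_succ']

-- digit extraction: the j-th (MSF) digit of m is m / 10^(len-1-j) % 10
lemma pvD_get : ∀ (m j : Nat), j < (pvD m).length →
    (pvD m).getD j 0 = (((m / 10 ^ ((pvD m).length - 1 - j)) % 10 : Nat) : Int) := by
  intro m
  induction m using Nat.strong_induction_on with
  | _ m ih =>
    intro j hj
    match m with
    | 0 => rw [pvD] at hj; simp at hj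
    | m + 1 =>
      rw [pvD] at hj ⊢
      simp only [List.length_append, List.length_cons, List.length_nil] at hj ⊢
      by_cases hjL : j < (pvD ((m + 1) / 10)).length
      · rw [List.getD_append _ _ _ _ (by omega)]
        rw [ih ((m + 1) / 10) (Nat.div_lt_self (Nat.succ_pos m) (by omega)) j hjL]
        have he : (pvD ((m + 1) / 10)).length + (0 + 1) - 1 - j =
            ((pvD ((m + 1) / 10)).length - 1 - j) + 1 := by omega
        rw [he, ← div10_pow]
      · have hjL' : j = (pvD ((m + 1) / 10)).length := by omega
        subst hjL'
        rw [List.getD_append_right _ _ _ _ (le_refl _)]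
        simp

-- (k - d) has quotient k/d - 1 and the same remainder, for d ≤ k
lemma sub_divmod (k d : Nat) (hd : 0 < d) (hk : d ≤ k) :
    (k - d) / d = k / d - 1 ∧ (k - d) % d = k % d := by
  have h := Nat.div_add_mod k d
  have hq : 1 ≤ k / d := (Nat.one_le_div_iff hd).mpr hk
  have hmodlt : k % d < d := Nat.mod_lt _ hd
  have h1 : k - d = d * (k / d - 1) + k % d := by
    have h2 : d * (k / d) = d * (k / d - 1) + d := by
      calc d * (k / d) = d * ((k / d - 1) + 1) := by rw [Nat.sub_add_cancel hq]
        _ = d * (k / d - 1) + d := by ring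
    omega
  constructor
  · rw [h1, Nat.mul_add_div hd, Nat.div_eq_of_lt hmodlt, Nat.add_zero]
  · rw [h1, Nat.mul_add_mod, Nat.mod_eq_of_lt hmodlt]

-- within the block of d-digit numbers starting at first + j, position k is digit k%d of number first + j + k/d
lemma pvBlock : ∀ (k j d first : Nat), 0 < d → first = 10 ^ (d - 1) → j < 9 * first →
    k < (9 * first - j) * d →
    pvAt k (first - 1 + j) = (pvD (first + j + k / d)).getD (k % d) 0 := by
  intro k
  induction k using Nat.strong_induction_on with
  | _ k ih =>
    intro j d first hd hf hj hk
    have hfpos : 0 < first := by rw [hf]; positivity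
    have hn1 : first - 1 + j + 1 = first + j := by omega
    have hlen : (pvD (first + j)).length = d := by
      have := pvD_len (d - 1) (first + j) (by omega)
        (by
          have : 10 ^ (d - 1 + 1) = 10 * first := by rw [hf, pow_succ]; ring
          omega)
      omega
    by_cases hkd : k < d
    · rw [pvAt_lt k (first - 1 + j) (by rw [hn1, hlen]; exact hkd)]
      rw [hn1, Nat.div_eq_of_lt hkd, Nat.mod_eq_of_lt hkd]
      simp
    · have hdk : d ≤ k := by omega
      rw [pvAt_ge k (first - 1 + j) (by rw [hn1, hlen]; omega)]
      rw [hn1, hlen]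
      have hj1 : j + 1 < 9 * first := by
        by_contra h
        have : 9 * first - j ≤ 1 := by omega
        have : (9 * first - j) * d ≤ d := by
          calc (9 * first - j) * d ≤ 1 * d := Nat.mul_le_mul_right d this
            _ = d := one_mul d
        omega
      have hk1 : k - d < (9 * first - (j + 1)) * d := by
        have : (9 * first - (j + 1)) * d = (9 * first - j) * d - d := by
          have h9 : 9 * first - (j + 1) = (9 * first - j) - 1 := by omega
          rw [h9, Nat.sub_one_mul]
        omega
      have hres := ih (k - d) (by omega) (j + 1) d first hd hf hj1 hk1
      rw [show first - 1 + (j + 1) = first + j from by omega] at hres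
      obtain ⟨hdiv, hmod⟩ := sub_divmod k d hd hdk
      rw [hdiv, hmod] at hres
      have hq1 : 1 ≤ k / d := (Nat.one_le_div_iff hd).mpr hdk
      rw [hres, show first + (j + 1) + (k / d - 1) = first + j + k / d from by omega]

-- skipping the remainder of a block: consuming (9*first - j)*d positions lands at the next block
lemma pvSkip : ∀ (t j d first k : Nat), 0 < d → first = 10 ^ (d - 1) → j + t = 9 * first →
    t * d ≤ k →
    pvAt k (first - 1 + j) = pvAt (k - t * d) (10 * first - 1) := by
  intro t
  induction t with
  | zero =>
    intro j d first k hd hf hj _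
    have hfpos : 0 < first := by rw [hf]; positivity
    have : first - 1 + j = 10 * first - 1 := by omega
    rw [this]; simp
  | succ t ih =>
    intro j d first k hd hf hj hk
    have hfpos : 0 < first := by rw [hf]; positivity
    have hjlt : j < 9 * first := by omega
    have hn1 : first - 1 + j + 1 = first + j := by omega
    have hlen : (pvD (first + j)).length = d := by
      have := pvD_len (d - 1) (first + j) (by omega)
        (by
          have : 10 ^ (d - 1 + 1) = 10 * first := by rw [hf, pow_succ]; ring
          omega)
      omega
    have hdk : d ≤ k := by
      calc d = 1 * d := (one_mul d).symm
        _ ≤ (t + 1) * d := Nat.mul_le_mul_right d (by omega)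
        _ ≤ k := hk
    rw [pvAt_ge k (first - 1 + j) (by rw [hn1, hlen]; exact hdk)]
    rw [hn1, hlen]
    have hexp : (t + 1) * d = t * d + d := by ring
    have hres := ih (j + 1) d first (k - d) hd hf (by omega) (by omega)
    rw [show first - 1 + (j + 1) = first + j from by omega] at hres
    rw [hres]
    congr 1
    omega

-- pvFind computes the block data; evaluated, it yields exactly pvAt k (first - 1)
lemma pvFindEval : ∀ (k fuel d first : Nat), k < fuel → 0 < d → first = 10 ^ (d - 1) →
    pvAt k (first - 1) =
      ((fun r : Nat × Nat × Nat =>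
          ((((r.2.2 + r.1 / r.2.1) / 10 ^ (r.2.1 - 1 - r.1 % r.2.1)) % 10 : Nat) : Int))
        (pvFind fuel k d first (9 * first))) := by
  intro k
  induction k using Nat.strong_induction_on with
  | _ k ih =>
    intro fuel d first hfuel hd hf
    have hfpos : 0 < first := by rw [hf]; positivity
    match fuel, hfuel with
    | fuel + 1, _ =>
      rw [pvFind]
      by_cases hcase : 9 * first * d ≤ k
      · rw [if_pos hcase]
        have hskip := pvSkip (9 * first) 0 d first k hd hf (by omega) (by omega)
        simp only [add_zero] at hskip
        rw [hskip]
        have hd1 : first * 10 = 10 ^ (d + 1 - 1) := by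
          rw [Nat.add_sub_cancel, hf, ← pow_succ]
          congr 1
          omega
        have h99 : 9 * 1 * 1 ≤ 9 * first * d :=
          Nat.mul_le_mul (Nat.mul_le_mul_left 9 hfpos) hd
        have hk' : k - 9 * first * d < k := by omega
        have hres := ih (k - 9 * first * d) hk' fuel (d + 1) (first * 10)
          (by omega) (by omega) hd1
        rw [show first * 10 - 1 = 10 * first - 1 from by rw [Nat.mul_comm],
          show 9 * (first * 10) = 9 * first * 10 from by ring] at hres
        exact hres
      · rw [if_neg hcase]
        have hklt : k < (9 * first - 0) * d := by rw [Nat.sub_zero]; omega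
        have hblock := pvBlock k 0 d first hd hf (by omega) hklt
        simp only [add_zero] at hblock
        rw [hblock]
        have hqlt : k / d < 9 * first := by
          rw [Nat.div_lt_iff_lt_mul hd]; omega
        have hlen : (pvD (first + k / d)).length = d := by
          have h10 : 10 ^ (d - 1 + 1) = 10 * first := by rw [hf, pow_succ]; ring
          have hge : 10 ^ (d - 1) ≤ first + k / d := by rw [← hf]; exact Nat.le_add_right _ _
          have hlt : first + k / d < 10 ^ (d - 1 + 1) := by
            rw [h10]
            calc first + k / d < first + 9 * first := Nat.add_lt_add_left hqlt first
              _ = 10 * first := by ring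
          have := pvD_len (d - 1) (first + k / d) hge hlt
          omega
        have hmod : k % d < d := Nat.mod_lt _ hd
        rw [pvD_get (first + k / d) (k % d) (by omega), hlen]

-- l.take t written as a map over range t
lemma take_eq_map_range (l : List Int) (t : Nat) (h : t ≤ l.length) :
    l.take t = (List.range t).map (fun k => l.getD k 0) := by
  apply List.ext_getElem
  · simp [Nat.min_eq_left h]
  · intro i h1 h2
    have hit : i < t := by simpa using h2
    simp only [List.getElem_take, List.getElem_map, List.getElem_range]
    rw [List.getD_eq_getElem l 0 (by omega)]

-- the truncated concatenation is the pointwise map of pvAt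
lemma pvCat_eq : ∀ (need fuel : Nat) (n : Int), need ≤ fuel → 1 ≤ n →
    pvCat fuel need n = (List.range need).map (fun k => pvAt k (n.toNat - 1)) := by
  intro need
  induction need using Nat.strong_induction_on with
  | _ need ih =>
    intro fuel n hfuel hn
    by_cases h0 : need = 0
    · subst h0
      cases fuel with
      | zero => simp [pvCat]
      | succ fuel => simp [pvCat]
    · match fuel, (by omega : 0 < fuel) with
      | fuel + 1, _ =>
        rw [pvCat, if_neg h0]
        dsimp only
        have hm : n.toNat - 1 + 1 = n.toNat := by omega
        set L := (pvD n.toNat).length with hL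
        have hLpos : 0 < L := pvD_len_pos n.toNat (by omega)
        by_cases hneed : need ≤ L
        · have hnl : need - L = 0 := by omega
          rw [hnl]
          have : pvCat fuel 0 (n + 1) = [] := by
            cases fuel with
            | zero => simp [pvCat]
            | succ f => simp [pvCat]
          rw [this, List.append_nil]
          rw [take_eq_map_range _ need (by omega)]
          apply List.map_congr_left
          intro k hk
          rw [List.mem_range] at hk
          rw [pvAt_lt k (n.toNat - 1) (by rw [hm]; omega), hm]
        · rw [show List.range need = List.range L ++ (List.range (need - L)).map (fun x => L + x)
              from by rw [← List.range_add]; congr 1; omega]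
          rw [List.map_append, List.map_map]
          congr 1
          · rw [List.take_of_length_le (by omega : (pvD n.toNat).length ≤ need)]
            have h1 : pvD n.toNat = (List.range L).map (fun k => (pvD n.toNat).getD k 0) := by
              rw [← take_eq_map_range (pvD n.toNat) L (by omega)]
              exact (List.take_of_length_le (by omega)).symm
            rw [h1]
            apply List.map_congr_left
            intro k hk
            rw [List.mem_range] at hk
            rw [pvAt_lt k (n.toNat - 1) (by rw [hm]; omega), hm]
          · rw [ih (need - L) (by omega) fuel (n + 1) (by omega) (by omega)]
            apply List.map_congr_left
            intro k hk
            rw [List.mem_range] at hk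
            simp only [Function.comp]
            have harg : L + k = k + L := by ring
            rw [harg, pvAt_ge (k + L) (n.toNat - 1) (by rw [hm]; omega)]
            rw [hm, Nat.add_sub_cancel]
            congr 1
            omega

lemma pvAt_zero_eq_digitAt (k : Nat) : pvAt k 0 = pvDigitAt k := by
  have := pvFindEval k (k + 1) 1 1 (by omega) (by omega) (by norm_num)
  simpa [pvDigitAt] using this

-- ===== VERDICT (by name: the statement is the Claim_ definition above) =====
theorem digit_sequence_spec : Claim_equal_digit_sequence := by
  intro limit _
  unfold Spec_digit_sequence digit_sequence digit_sequence_alt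
  rw [pvMain limit.toNat limit.toNat limit.toNat limit 0 1 (by omega) (by omega) le_rfl le_rfl]
  rw [pvCat_eq limit.toNat limit.toNat 1 le_rfl le_rfl]
  apply List.map_congr_left
  intro k _
  simpa using pvAt_zero_eq_digitAt k
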